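-- pv_equiv track=rewrite | github.com/Shriya-Reddy/Assign-people-to-teams | assign.py | arrange_into_teams
-- ===== SOURCE A (Python) =====
-- def arrange_into_teams(people_name,dont_want_to_work):
--     teams1 = []
--     teams2 = []
--     teams3 = []
--     for i in range(len(people_name)):
--         teams1.append(people_name[i])
--         for j in range(i+1,len(people_name)):
--             if (people_name[j] in dont_want_to_work[people_name[i]]) or (people_name[i] in dont_want_to_work[people_name[j]]):
--                 continue
--             else:
--                 teams2.append([people_name[i],people_name[j]])
--     check_team = []
--     for k in range(len(people_name)):
--
--         for l in range(k+1,len(people_name)):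
--             if (people_name[l] in dont_want_to_work[people_name[k]]) or (people_name[k] in dont_want_to_work[people_name[l]]):
--                 continue
--             else:
--                 check_team = ([people_name[k],people_name[l]])
--                 for m in range(l+1,len(people_name)):
--                     if (people_name[m] in dont_want_to_work[check_team[0]] or people_name[m] in dont_want_to_work[check_team[1]]) or (check_team[0]in dont_want_to_work[people_name[m]] or check_team[1] in dont_want_to_work[people_name[m]]):#checktwoway
--                         continue
--                     else:
--                         teams3.append([people_name[k],people_name[l],people_name[m]])
--     return teams1,teams2,teams3
-- ===== SOURCE B (Python) =====
-- def arrange_into_teams(people_name, dont_want_to_work):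
--     n = len(people_name)
--
--     def compatible(a, b):
--         return b not in dont_want_to_work[a] and a not in dont_want_to_work[b]
--
--     # forward adjacency: indices j > i compatible with i
--     nbr = [[j for j in range(i + 1, n) if compatible(people_name[i], people_name[j])]
--            for i in range(n)]
--     nbr_sets = [set(l) for l in nbr]
--
--     teams1 = list(people_name)
--     teams2 = [[people_name[i], people_name[j]] for i in range(n) for j in nbr[i]]
--     teams3 = [[people_name[i], people_name[j], people_name[k]]
--               for i in range(n) for j in nbr[i]
--               for k in nbr[j] if k in nbr_sets[i]]
--     return teams1, teams2, teams3
-- ===== Notes on version B (the rewrite author's own statement) =====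
-- stated objective: alternative
-- what changed: Replaces A's quadruply-nested index loops re-testing the exclusion dict for every pair and triple with a precomputed forward-adjacency table nbr[i] (compatible j>i); teams2 is read off nbr and teams3 is built by intersecting nbr[j] with set(nbr[i]), so the pair predicate is evaluated once per pair instead of re-evaluated inside the triple loop.
-- outside the precondition, e.g. on arrange_into_teams(['a', 'b'], {'a': ['b']}): A returns (['a', 'b'], [], []), B returns (['a', 'b'], [], [])
import Mathlib
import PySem

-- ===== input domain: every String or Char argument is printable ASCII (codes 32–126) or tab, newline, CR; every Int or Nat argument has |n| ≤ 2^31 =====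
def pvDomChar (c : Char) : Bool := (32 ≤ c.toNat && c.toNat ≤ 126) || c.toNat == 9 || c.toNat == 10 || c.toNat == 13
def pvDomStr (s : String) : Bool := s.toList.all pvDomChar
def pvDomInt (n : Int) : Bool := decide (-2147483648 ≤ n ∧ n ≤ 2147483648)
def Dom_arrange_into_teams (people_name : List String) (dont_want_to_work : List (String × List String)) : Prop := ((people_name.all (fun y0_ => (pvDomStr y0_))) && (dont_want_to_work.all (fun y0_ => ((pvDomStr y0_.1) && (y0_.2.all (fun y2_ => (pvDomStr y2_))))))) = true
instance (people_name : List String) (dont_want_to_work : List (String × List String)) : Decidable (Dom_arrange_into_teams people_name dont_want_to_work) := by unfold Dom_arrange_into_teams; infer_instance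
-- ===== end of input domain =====

-- B replaces A's nested index loops (which re-test the exclusion dict for every pair and triple)
-- by a precomputed forward-adjacency table nbr, reading teams2 off nbr and building teams3 by
-- intersecting nbr[j] with set(nbr[i]); objective: alternative decomposition, same results.


-- ===== PORT A =====
-- dont_want_to_work[x] is ported as (PySem.Dict.mk …).getD x []; exact under Pre_ (every
-- looked-up name is a key, so no KeyError path is reachable).
def arrange_into_teams (people_name : List String) (dont_want_to_work : List (String × List String)) : List String × List (List String) × List (List String) :=
  let n := people_name.length
  let d := PySem.Dict.mk dont_want_to_work
  let t12 : List String × List (List String) :=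
    (List.range n).foldl (fun acc i =>
      let teams1 := acc.1 ++ [people_name.getD i ""]
      let teams2 := (List.range' (i+1) (n - (i+1))).foldl (fun t2 j =>
        if (d.getD (people_name.getD i "") []).contains (people_name.getD j "")
           || (d.getD (people_name.getD j "") []).contains (people_name.getD i "") then
          t2
        else
          t2 ++ [[people_name.getD i "", people_name.getD j ""]]) acc.2
      (teams1, teams2)) ([], [])
  let teams3 : List (List String) :=
    (List.range n).foldl (fun t3 k =>
      (List.range' (k+1) (n - (k+1))).foldl (fun t3 l =>
        if (d.getD (people_name.getD k "") []).contains (people_name.getD l "")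
           || (d.getD (people_name.getD l "") []).contains (people_name.getD k "") then
          t3
        else
          let check_team := [people_name.getD k "", people_name.getD l ""]
          (List.range' (l+1) (n - (l+1))).foldl (fun t3 m =>
            if ((d.getD (check_team.getD 0 "") []).contains (people_name.getD m "")
                || (d.getD (check_team.getD 1 "") []).contains (people_name.getD m ""))
               || ((d.getD (people_name.getD m "") []).contains (check_team.getD 0 "")
                || (d.getD (people_name.getD m "") []).contains (check_team.getD 1 "")) then
              t3
            else
              t3 ++ [[people_name.getD k "", people_name.getD l "", people_name.getD m ""]]) t3) t3) []
  (t12.1, t12.2, teams3)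

-- ===== PORT B =====
def arrange_into_teams_alt (people_name : List String) (dont_want_to_work : List (String × List String)) : List String × List (List String) × List (List String) :=
  let n := people_name.length
  let d := PySem.Dict.mk dont_want_to_work
  let compatible : String → String → Bool := fun a b =>
    !(d.getD a []).contains b && !(d.getD b []).contains a
  let nbr : List (List Nat) :=
    (List.range n).map (fun i =>
      (List.range' (i+1) (n - (i+1))).filter (fun j =>
        compatible (people_name.getD i "") (people_name.getD j "")))
  let nbr_sets : List (PySem.Set Nat) := nbr.map (fun l => PySem.Set.ofList l)
  let teams1 := people_name
  let teams2 := (List.range n).flatMap (fun i =>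
    (nbr.getD i []).map (fun j => [people_name.getD i "", people_name.getD j ""]))
  let teams3 := (List.range n).flatMap (fun i =>
    (nbr.getD i []).flatMap (fun j =>
      ((nbr.getD j []).filter (fun k =>
        PySem.Set.contains (nbr_sets.getD i PySem.Set.empty) k)).map (fun k =>
          [people_name.getD i "", people_name.getD j "", people_name.getD k ""])))
  (teams1, teams2, teams3)

-- ===== PRECONDITION & SPEC =====
-- Pre_ excludes inputs with ≥ 2 people where some listed person is not a key of the exclusion
-- dict: there both programs' short-circuited dict lookups generally raise KeyError, and on the
-- rare such inputs where A still returns the reachable lookups depend on incidental evaluation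
-- order (see cites).
def Pre_arrange_into_teams (people_name : List String) (dont_want_to_work : List (String × List String)) : Prop :=
  people_name.length ≤ 1 ∨ ∀ s ∈ people_name, (PySem.Dict.mk dont_want_to_work).contains s = true
instance (people_name : List String) (dont_want_to_work : List (String × List String)) : Decidable (Pre_arrange_into_teams people_name dont_want_to_work) := by unfold Pre_arrange_into_teams; infer_instance

def pvWitness_arrange_into_teams : List String × (List (String × List String)) :=
  (["ann", "bob", "cal"], [("ann", ["bob"]), ("bob", []), ("cal", [])])

def Spec_arrange_into_teams (people_name : List String) (dont_want_to_work : List (String × List String)) (out : List String × List (List String) × List (List String)) : Prop := out = arrange_into_teams_alt people_name dont_want_to_work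
instance (people_name : List String) (dont_want_to_work : List (String × List String)) (out : List String × List (List String) × List (List String)) : Decidable (Spec_arrange_into_teams people_name dont_want_to_work out) := by unfold Spec_arrange_into_teams; infer_instance

-- ===== CLAIM (what is proved, stated in full; the proofs are below) =====
def Claim_equal_arrange_into_teams : Prop := ∀ (people_name : List String) (dont_want_to_work : List (String × List String)), Dom_arrange_into_teams people_name dont_want_to_work → Pre_arrange_into_teams people_name dont_want_to_work → Spec_arrange_into_teams people_name dont_want_to_work (arrange_into_teams people_name dont_want_to_work)

-- ===== LEMMAS AND PROOFS =====

theorem foldl_skip_append {α β : Type} (c : α → Bool) (f : α → β) (l : List α) (acc : List β) :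
    l.foldl (fun acc x => if c x then acc else acc ++ [f x]) acc
      = acc ++ (l.filter (fun x => !c x)).map f := by
  induction l generalizing acc with
  | nil => simp
  | cons a t ih => by_cases h : c a <;> simp [h, ih]

theorem foldl_skip_extend {α β : Type} (c : α → Bool) (g : α → List β) (l : List α) (acc : List β) :
    l.foldl (fun acc x => if c x then acc else acc ++ g x) acc
      = acc ++ l.flatMap (fun x => if c x then [] else g x) := by
  induction l generalizing acc with
  | nil => simp
  | cons a t ih => by_cases h : c a <;> simp [h, ih]

theorem filter_flatMap {α β : Type} (l : List α) (p : α → Bool) (g : α → List β) :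
    (l.filter p).flatMap g = l.flatMap (fun x => if p x then g x else []) := by
  induction l with
  | nil => rfl
  | cons a t ih => by_cases h : p a <;> simp [h, ih]

theorem map_getD_range (p : List String) : (List.range p.length).map (fun i => p.getD i "") = p := by
  apply List.ext_getElem
  · simp
  · intro i h1 h2
    simp [List.getElem?_eq_getElem h2]

theorem arrange_into_teams_main (p : List String) (d : List (String × List String)) :
    arrange_into_teams p d = arrange_into_teams_alt p d := by
  unfold arrange_into_teams arrange_into_teams_alt
  dsimp only
  rw [PySem.List.foldl_prod_mk
    (fun a i => a ++ [p.getD i ""])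
    (fun b i => (List.range' (i+1) (p.length - (i+1))).foldl (fun t2 j =>
        if ((PySem.Dict.mk d).getD (p.getD i "") []).contains (p.getD j "")
           || ((PySem.Dict.mk d).getD (p.getD j "") []).contains (p.getD i "") then t2
        else t2 ++ [[p.getD i "", p.getD j ""]]) b)]
  simp only [foldl_skip_append, foldl_skip_extend,
    PySem.List.foldl_append_eq_flatMap, List.nil_append, List.map_map]
  simp only [Prod.mk.injEq]
  refine ⟨?_, ?_, ?_⟩
  · rw [← List.map_eq_flatMap]
    exact map_getD_range p
  · apply List.flatMap_congr
    intro i hi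
    rw [PySem.List.getD_map_range _ _ _ _ (List.mem_range.mp hi)]
    simp only [Bool.not_or]
  · apply List.flatMap_congr
    intro i hi
    have hin : i < p.length := List.mem_range.mp hi
    rw [PySem.List.getD_map_range _ _ _ _ hin, PySem.List.getD_map_range _ _ _ _ hin, filter_flatMap]
    apply List.flatMap_congr
    intro j hj
    have hjr := List.mem_range'_1.mp hj
    have hjn : j < p.length := by omega
    rw [PySem.List.getD_map_range _ _ _ _ hjn]
    simp only [Function.comp_apply, List.getD_cons_zero, List.getD_cons_succ, ← Bool.not_or]
    cases hc : (((PySem.Dict.mk d).getD (p.getD i "") []).contains (p.getD j "")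
        || ((PySem.Dict.mk d).getD (p.getD j "") []).contains (p.getD i "")) with
    | true => simp
    | false =>
      simp only [Bool.not_false, Bool.false_eq_true, if_true, if_false]
      congr 1
      rw [List.filter_filter]
      apply List.filter_congr
      intro m hm
      have hmr := List.mem_range'_1.mp hm
      have hco : PySem.Set.contains
          (PySem.Set.ofList (List.filter
            (fun j => !(((PySem.Dict.mk d).getD (p.getD i "") []).contains (p.getD j "")
               || ((PySem.Dict.mk d).getD (p.getD j "") []).contains (p.getD i "")))
            (List.range' (i + 1) (p.length - (i + 1))))) m
          = (!(((PySem.Dict.mk d).getD (p.getD i "") []).contains (p.getD m "")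
             || ((PySem.Dict.mk d).getD (p.getD m "") []).contains (p.getD i ""))) := by
        rw [Bool.eq_iff_iff]
        simp only [PySem.Set.contains_iff, PySem.Set.mem_ofList, List.mem_filter,
          List.mem_range'_1]
        constructor
        · rintro ⟨-, h2⟩; exact h2
        · intro h2; exact ⟨by omega, h2⟩
      rw [hco]
      have booltau : ∀ a b c e : Bool,
          (!(a || c) && !(b || e)) = (!(a || b || (c || e))) := by decide
      rw [booltau]


-- ===== VERDICT (by name: the statement is the Claim_ definition above) =====
theorem arrange_into_teams_spec : Claim_equal_arrange_into_teams := by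
  intro p d _ _
  exact arrange_into_teams_main p d
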